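-- pv_equiv track=rewrite | github.com/Happy-ryan/PS | 백준/Bronze/4583. 거울상/거울상.py | f
-- ===== SOURCE A (Python) =====
-- def f(s):
--     ans = ''
--     for x in s[::-1]:
--         if x == 'b':
--             ans += 'd'
--         elif x == 'd':
--             ans += 'b'
--         elif x == 'p':
--             ans += 'q'
--         elif x == 'q':
--             ans += 'p'
--         elif x == 'i' or x == 'o' or x == 'v' or x == 'w' or x == 'x':
--             ans += x
--         else:
--             return 'INVALID'
--
--     return ans
-- ===== SOURCE B (Python) =====
-- _MIRROR = str.maketrans('bdpq', 'dbqp')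
-- _ALLOWED = set('bdpqiovwx')
--
-- def f(s):
--     # pass 1: validate the whole string
--     if any(c not in _ALLOWED for c in s):
--         return 'INVALID'
--     # pass 2: mirror = reverse + fixed character translation
--     return s[::-1].translate(_MIRROR)
-- ===== Notes on version B (the rewrite author's own statement) =====
-- stated objective: simpler
-- what changed: Replaces A's single fused reverse-loop with early return by a validate-first pass (every char in the allowed set) followed by a translation table applied to the reversed string.
import Mathlib
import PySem

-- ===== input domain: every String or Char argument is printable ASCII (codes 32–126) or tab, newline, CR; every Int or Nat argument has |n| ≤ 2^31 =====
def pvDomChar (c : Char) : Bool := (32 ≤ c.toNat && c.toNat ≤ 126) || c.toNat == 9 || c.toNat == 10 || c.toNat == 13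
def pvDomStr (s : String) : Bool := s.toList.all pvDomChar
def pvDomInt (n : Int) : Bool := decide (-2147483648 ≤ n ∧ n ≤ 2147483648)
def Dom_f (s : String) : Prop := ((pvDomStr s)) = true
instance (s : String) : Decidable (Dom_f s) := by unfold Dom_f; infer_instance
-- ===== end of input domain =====

-- B validates the whole string first, then maps a fixed mirror table over the reversed
-- string, instead of A's single fused loop with early return; same return value everywhere.

-- ===== PORT A =====
-- the for-loop of A over s[::-1], accumulating ans; early 'return INVALID' stops the loop
def fLoop : List Char → String → String
  | [], ans => ans
  | x :: rest, ans =>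
    if x = 'b' then fLoop rest (ans ++ "d")
    else if x = 'd' then fLoop rest (ans ++ "b")
    else if x = 'p' then fLoop rest (ans ++ "q")
    else if x = 'q' then fLoop rest (ans ++ "p")
    else if x = 'i' ∨ x = 'o' ∨ x = 'v' ∨ x = 'w' ∨ x = 'x' then fLoop rest (ans ++ String.ofList [x])
    else "INVALID"

def f (s : String) : String := fLoop s.toList.reverse ""

-- ===== PORT B =====
def fValid (c : Char) : Bool :=
  c = 'b' || c = 'd' || c = 'p' || c = 'q' || c = 'i' || c = 'o' || c = 'v' || c = 'w' || c = 'x'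

def fMirror (c : Char) : Char :=
  if c = 'b' then 'd' else if c = 'd' then 'b'
  else if c = 'p' then 'q' else if c = 'q' then 'p' else c

def f_alt (s : String) : String :=
  if s.toList.any (fun c => !fValid c) then "INVALID"
  else String.ofList ((s.toList.reverse).map fMirror)

-- ===== PRECONDITION & SPEC =====
def Spec_f (s : String) (out : String) : Prop := out = f_alt s
instance (s : String) (out : String) : Decidable (Spec_f s out) := by unfold Spec_f; infer_instance

-- ===== CLAIM (what is proved, stated in full; the proofs are below) =====
def Claim_equal_f : Prop := ∀ (s : String), Dom_f s → Spec_f s (f s)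

-- ===== LEMMAS AND PROOFS =====
theorem fLoop_char (l : List Char) (ans : String) :
    fLoop l ans = if l.all fValid then ans ++ String.ofList (l.map fMirror) else "INVALID" := by
  induction l generalizing ans with
  | nil => simp [fLoop]
  | cons x rest ih =>
    simp only [fLoop, List.all_cons, List.map_cons]
    by_cases hb : x = 'b'
    · subst hb
      simp [fValid, fMirror, ih]
      split
      · simp [← String.toList_inj]
      · rfl
    · by_cases hd : x = 'd'
      · subst hd
        simp [fValid, fMirror, ih]
        split
        · simp [← String.toList_inj]
        · rfl
      · by_cases hp : x = 'p'
        · subst hp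
          simp [fValid, fMirror, ih]
          split
          · simp [← String.toList_inj]
          · rfl
        · by_cases hq : x = 'q'
          · subst hq
            simp [fValid, fMirror, ih]
            split
            · simp [← String.toList_inj]
            · rfl
          · by_cases ho : x = 'i' ∨ x = 'o' ∨ x = 'v' ∨ x = 'w' ∨ x = 'x'
            · have hv : fValid x = true := by
                rcases ho with h|h|h|h|h <;> subst h <;> decide
              have hm : fMirror x = x := by
                simp [fMirror, hb, hd, hp, hq]
              simp [hb, hd, hp, hq, ho, hv, hm, ih]
              split
              · simp [← String.toList_inj]
              · rfl
            · have hv : fValid x = false := by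
                simp only [fValid]
                push Not at ho
                simp [hb, hd, hp, hq, ho.1, ho.2.1, ho.2.2.1, ho.2.2.2.1, ho.2.2.2.2]
              simp [hb, hd, hp, hq, ho, hv]

-- ===== VERDICT (by name: the statement is the Claim_ definition above) =====
theorem f_spec : Claim_equal_f := by
  intro s _
  unfold Spec_f f f_alt
  rw [fLoop_char]
  cases h : s.toList.any (fun c => !fValid c)
  · have : s.toList.reverse.all fValid = true := by
      simp only [List.any_eq_false] at h
      simp only [List.all_eq_true, List.mem_reverse]
      intro c hc
      have := h c hc
      simpa using this
    simp only [this, Bool.true_and, if_true]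
    rfl
  · have : s.toList.reverse.all fValid = false := by
      simp only [List.any_eq_true] at h
      obtain ⟨c, hc, hv⟩ := h
      simp only [List.all_eq_false]
      exact ⟨c, List.mem_reverse.mpr hc, by simpa using hv⟩
    simp [this]
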